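-- pv_equiv track=rewrite | github.com/kimmathiassen/ProvenanceEnabledCubes | src/charts.py | indexPerAQuery
-- ===== SOURCE A (Python) =====
-- def indexPerAQuery(data):
--     output = {}
--     for dataset in data :
--         output[dataset] = {}
--         for cache in data[dataset] :
--             for selection in data[dataset][cache] :
--                 for budget in data[dataset][cache][selection] :
--                     for aQuery in data[dataset][cache][selection][budget] :
--                         if aQuery not in output[dataset] :
--                             output[dataset][aQuery] = {}
--
--                         if cache not in output[dataset][aQuery] :
--                             output[dataset][aQuery][cache] = {}
--
--                         if selection not in output[dataset][aQuery][cache] :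
--                             output[dataset][aQuery][cache][selection] = {}
--
--                         if budget not in output[dataset][aQuery][cache][selection] :
--                             output[dataset][aQuery][cache][selection][budget] = {}
--
--
--                         output[dataset][aQuery][cache][selection][budget] = data[dataset][cache][selection][budget][aQuery]
--
--     return output
-- ===== SOURCE B (Python) =====
-- def indexPerAQuery(data):
--     # query-major projection: list each dataset's aQueries once, then build each
--     # output sub-dict by filtering the original tree per aQuery (no incremental inserts)
--     output = {}
--     for ds, dsv in data.items():
--         seen = []
--         for cv in dsv.values():
--             for sv in cv.values():
--                 for bv in sv.values():
--                     for aq in bv: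
--                         if aq not in seen:
--                             seen.append(aq)
--         output[ds] = {
--             aq: {
--                 c: {
--                     s: {b: bv[aq] for b, bv in sv.items() if aq in bv}
--                     for s, sv in cv.items()
--                     if any(aq in bv for bv in sv.values())
--                 }
--                 for c, cv in dsv.items()
--                 if any(aq in bv for sv in cv.values() for bv in sv.values())
--             }
--             for aq in seen
--         }
--     return output
-- ===== Notes on version B (the rewrite author's own statement) =====
-- stated objective: alternative
-- what changed: A builds the reordered dict incrementally, one leaf at a time, with membership tests creating intermediate dicts in place; B is query-major: it first lists each dataset's distinct aQueries in first-occurrence order, then constructs each output[dataset][aQuery] subtree in one shot by filtering/projecting the original nested structure with comprehensions (pruning caches/selections without that aQuery), with no incremental insertion at all.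
import Mathlib
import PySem

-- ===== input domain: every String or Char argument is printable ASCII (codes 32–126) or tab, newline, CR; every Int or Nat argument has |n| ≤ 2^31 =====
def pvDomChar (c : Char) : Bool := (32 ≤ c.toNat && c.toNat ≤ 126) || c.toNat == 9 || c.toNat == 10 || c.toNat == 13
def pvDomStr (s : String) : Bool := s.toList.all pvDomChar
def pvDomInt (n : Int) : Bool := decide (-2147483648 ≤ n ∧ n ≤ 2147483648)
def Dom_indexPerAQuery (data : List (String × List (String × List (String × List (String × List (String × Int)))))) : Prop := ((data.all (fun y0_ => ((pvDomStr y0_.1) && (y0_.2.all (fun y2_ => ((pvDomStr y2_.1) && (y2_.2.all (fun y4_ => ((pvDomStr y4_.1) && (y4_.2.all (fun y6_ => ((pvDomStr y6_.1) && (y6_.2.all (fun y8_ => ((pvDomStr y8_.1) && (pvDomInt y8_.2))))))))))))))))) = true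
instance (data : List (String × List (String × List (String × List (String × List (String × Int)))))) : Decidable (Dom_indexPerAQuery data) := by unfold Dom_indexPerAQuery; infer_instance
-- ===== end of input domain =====

-- One honest line: B is query-major — it lists each dataset's distinct aQueries once and then
-- builds each output subtree by filtering/projecting the original nested structure per aQuery,
-- instead of A's leaf-by-leaf incremental dict construction (alternative decomposition, not faster).

-- Nested-dict types used by port A (Python dicts mutated in place).
abbrev PvD0 : Type := PySem.Dict String Int
abbrev PvD1 : Type := PySem.Dict String PvD0
abbrev PvD2 : Type := PySem.Dict String PvD1
abbrev PvD3 : Type := PySem.Dict String PvD2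

-- marshalling of A's finished nested dicts back to the assoc-list return type
def pvM2 (d : PvD2) : List (String × List (String × List (String × Int))) :=
  d.items.map (fun q => (q.1, q.2.items.map (fun r => (r.1, r.2.items))))
def pvM3 (d : PvD3) : List (String × List (String × List (String × List (String × Int)))) :=
  d.items.map (fun p => (p.1, pvM2 p.2))
def pvOut (o : PySem.Dict String PvD3) : List (String × List (String × List (String × List (String × List (String × Int))))) :=
  o.items.map (fun p => (p.1, pvM3 p.2))

-- ===== PORT A =====
-- one leaf of A's innermost loop body: the three 'if … not in …: … = {}' guards reading
-- through the current chain, then the assignment (the 'if budget not in' creates a dict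
-- that the very next line overwrites with the int value, so it is the plain insert).
def pvLeafA (acc : PvD3) (cache selection budget aQuery : String) (v : Int) : PvD3 :=
  let acc := if acc.contains aQuery then acc else acc.insert aQuery (PySem.Dict.mk [])
  let l2 := acc.getD aQuery (PySem.Dict.mk [])
  let l2 := if l2.contains cache then l2 else l2.insert cache (PySem.Dict.mk [])
  let l3 := l2.getD cache (PySem.Dict.mk [])
  let l3 := if l3.contains selection then l3 else l3.insert selection (PySem.Dict.mk [])
  let l4 := l3.getD selection (PySem.Dict.mk [])
  let l4 := l4.insert budget v
  acc.insert aQuery (l2.insert cache (l3.insert selection l4))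

def indexPerAQuery (data : List (String × List (String × List (String × List (String × List (String × Int)))))) : List (String × List (String × List (String × List (String × List (String × Int))))) :=
  -- in-place mutation of output[dataset] becomes read (getD), modify (pvLeafA), write back (insert)
  pvOut (data.foldl (fun output dsp =>
    let output := output.insert dsp.1 (PySem.Dict.mk [])
    dsp.2.foldl (fun output cp =>
      cp.2.foldl (fun output sp =>
        sp.2.foldl (fun output bp =>
          bp.2.foldl (fun output ap =>
            output.insert dsp.1
              (pvLeafA (output.getD dsp.1 (PySem.Dict.mk [])) cp.1 sp.1 bp.1 ap.1 ap.2))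
            output) output) output) output) (PySem.Dict.mk []))

-- ===== PORT B =====
-- 'aq in bv' and the two any(...) generator tests of Source B
def pvHasQ4 (q : String) (bv : List (String × Int)) : Bool := bv.any (fun ap => ap.1 == q)
def pvHasQ3 (q : String) (sv : List (String × List (String × Int))) : Bool := sv.any (fun bp => pvHasQ4 q bp.2)
def pvHasQ2 (q : String) (cv : List (String × List (String × List (String × Int)))) : Bool := cv.any (fun sp => pvHasQ3 q sp.2)

-- the 'seen' list of first occurrences of aQueries (Source B's first loop nest)
def pvSeen (dsv : List (String × List (String × List (String × List (String × Int))))) : List String :=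
  dsv.foldl (fun seen cp =>
    cp.2.foldl (fun seen sp =>
      sp.2.foldl (fun seen bp =>
        bp.2.foldl (fun seen ap =>
          if seen.contains ap.1 then seen else seen ++ [ap.1]) seen) seen) seen) []

-- Source B's nested comprehension for one aQuery: filter the original tree, read the value at q
-- (bv[aq] is a dict lookup: PySem.Dict.getD; the comprehension's 'if aq in bv' guards it)
def pvProj (q : String) (dsv : List (String × List (String × List (String × List (String × Int))))) :
    List (String × List (String × List (String × Int))) :=
  (dsv.filter (fun cp => pvHasQ2 q cp.2)).map (fun cp =>
    (cp.1, (cp.2.filter (fun sp => pvHasQ3 q sp.2)).map (fun sp =>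
      (sp.1, (sp.2.filter (fun bp => pvHasQ4 q bp.2)).map (fun bp =>
        (bp.1, (PySem.Dict.mk bp.2).getD q 0))))))

def indexPerAQuery_alt (data : List (String × List (String × List (String × List (String × List (String × Int)))))) : List (String × List (String × List (String × List (String × List (String × Int))))) :=
  (data.foldl (fun output dsp =>
    output.insert dsp.1 ((pvSeen dsp.2).map (fun q => (q, pvProj q dsp.2))))
    (PySem.Dict.mk [])).items

-- ===== PRECONDITION & SPEC =====
-- Pre_ excludes association lists carrying a duplicate key at any dict level: such a list
-- does not represent any Python dict (the dict the Python functions receive keeps one entry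
-- per key), so the behaviour there is an artefact of the list encoding.
def Pre_indexPerAQuery (data : List (String × List (String × List (String × List (String × List (String × Int)))))) : Prop :=
  (data.map Prod.fst).Nodup ∧ ∀ d ∈ data, (d.2.map Prod.fst).Nodup ∧
    ∀ c ∈ d.2, (c.2.map Prod.fst).Nodup ∧
      ∀ s ∈ c.2, (s.2.map Prod.fst).Nodup ∧
        ∀ b ∈ s.2, (b.2.map Prod.fst).Nodup
instance (data : List (String × List (String × List (String × List (String × List (String × Int)))))) : Decidable (Pre_indexPerAQuery data) := by unfold Pre_indexPerAQuery; infer_instance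

def pvWitness_indexPerAQuery : (List (String × List (String × List (String × List (String × List (String × Int)))))) :=
  [("d1", [("c", [("s", [("b", [("q1", 3), ("q2", 4)])])])]), ("d2", [])]

def Spec_indexPerAQuery (data : List (String × List (String × List (String × List (String × List (String × Int)))))) (out : List (String × List (String × List (String × List (String × List (String × Int)))))) : Prop := out = indexPerAQuery_alt data
instance (data : List (String × List (String × List (String × List (String × List (String × Int)))))) (out : List (String × List (String × List (String × List (String × List (String × Int)))))) : Decidable (Spec_indexPerAQuery data out) := by
  unfold Spec_indexPerAQuery
  haveI h1 : DecidableEq (List (String × Int)) := inferInstance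
  haveI h2 : DecidableEq (List (String × List (String × Int))) := inferInstance
  haveI h3 : DecidableEq (List (String × List (String × List (String × Int)))) := inferInstance
  haveI h4 : DecidableEq (List (String × List (String × List (String × List (String × Int))))) := inferInstance
  haveI h5 : DecidableEq (List (String × List (String × List (String × List (String × List (String × Int)))))) := inferInstance
  infer_instance

-- ===== CLAIM (what is proved, stated in full; the proofs are below) =====
def Claim_equal_indexPerAQuery : Prop := ∀ (data : List (String × List (String × List (String × List (String × List (String × Int)))))), Dom_indexPerAQuery data → Pre_indexPerAQuery data → Spec_indexPerAQuery data (indexPerAQuery data)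

-- ===== LEMMAS AND PROOFS =====

-- the flat leaf records (cache, selection, budget, aQuery, value) of one dataset's value
abbrev PvRec : Type := String × String × String × String × Int
def pvRecs (dsv : List (String × List (String × List (String × List (String × Int))))) : List PvRec :=
  dsv.flatMap (fun cp => cp.2.flatMap (fun sp => sp.2.flatMap (fun bp =>
    bp.2.map (fun ap => (cp.1, sp.1, bp.1, ap.1, ap.2)))))

-- the per-dataset inner dict A ends up with, as a single keyed fold over the records
def pvF3 (l4 : PvD0) (r : PvRec) : PvD0 := l4.insert r.2.2.1 r.2.2.2.2
def pvF2 (l3 : PvD1) (r : PvRec) : PvD1 := l3.insert r.2.1 (pvF3 (l3.getD r.2.1 (PySem.Dict.mk [])) r)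
def pvF1 (l2 : PvD2) (r : PvRec) : PvD2 := l2.insert r.1 (pvF2 (l2.getD r.1 (PySem.Dict.mk [])) r)
def pvG (dsv : List (String × List (String × List (String × List (String × Int))))) : PvD3 :=
  (pvRecs dsv).foldl
    (fun l1 r => l1.insert r.2.2.2.1 (pvF1 (l1.getD r.2.2.2.1 (PySem.Dict.mk [])) r)) (PySem.Dict.mk [])

-- A's leaf body is the keyed-fold step
theorem pv_leaf_eq (acc : PvD3) (c s b aq : String) (v : Int) :
    pvLeafA acc c s b aq v
      = acc.insert aq (pvF1 (acc.getD aq (PySem.Dict.mk [])) (c, s, b, aq, v)) := by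
  unfold pvLeafA pvF1 pvF2 pvF3
  by_cases h1 : acc.contains aq = true
  · by_cases h2 : (acc.getD aq (PySem.Dict.mk [])).contains c = true
    · by_cases h3 : ((acc.getD aq (PySem.Dict.mk [])).getD c (PySem.Dict.mk [])).contains s = true
      · simp [h1, h2, h3]
      · simp [h1, h2, h3, PySem.Dict.getD_insert_self, PySem.Dict.insert_insert_self,
          PySem.Dict.getD_of_not_contains]
    · simp [h1, h2, PySem.Dict.getD_insert_self, PySem.Dict.insert_insert_self,
        PySem.Dict.getD_of_not_contains]
  · simp [h1, PySem.Dict.getD_insert_self, PySem.Dict.insert_insert_self,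
      PySem.Dict.getD_of_not_contains]

-- read-modify-write at one key k collapses to a single insert at k
theorem pv_rmw {α : Type} (L : List α) (g : PvD3 → α → PvD3) (k : String)
    (o : PySem.Dict String PvD3) (w : PvD3) :
    L.foldl (fun o x => o.insert k (g (o.getD k (PySem.Dict.mk [])) x)) (o.insert k w)
      = o.insert k (L.foldl g w) := by
  induction L generalizing w with
  | nil => rfl
  | cons x L ih =>
    simp only [List.foldl_cons, PySem.Dict.getD_insert_self, PySem.Dict.insert_insert_self]
    exact ih (g w x)

-- A's whole per-dataset block is one insert of pvG
theorem pv_A_block (o : PySem.Dict String PvD3) (ds : String)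
    (dsv : List (String × List (String × List (String × List (String × Int))))) :
    (dsv.foldl (fun output cp =>
      cp.2.foldl (fun output sp =>
        sp.2.foldl (fun output bp =>
          bp.2.foldl (fun output ap =>
            output.insert ds
              (pvLeafA (output.getD ds (PySem.Dict.mk [])) cp.1 sp.1 bp.1 ap.1 ap.2))
            output) output) output) (o.insert ds (PySem.Dict.mk [])))
      = o.insert ds (pvG dsv) := by
  have hflat : (pvRecs dsv).foldl
      (fun output r => output.insert ds
        (pvLeafA (output.getD ds (PySem.Dict.mk [])) r.1 r.2.1 r.2.2.1 r.2.2.2.1 r.2.2.2.2))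
      (o.insert ds (PySem.Dict.mk []))
      = (dsv.foldl (fun output cp =>
      cp.2.foldl (fun output sp =>
        sp.2.foldl (fun output bp =>
          bp.2.foldl (fun output ap =>
            output.insert ds
              (pvLeafA (output.getD ds (PySem.Dict.mk [])) cp.1 sp.1 bp.1 ap.1 ap.2))
            output) output) output) (o.insert ds (PySem.Dict.mk []))) := by
    simp only [pvRecs, List.foldl_flatMap, List.foldl_map]
  rw [← hflat]
  have hstep : (fun (output : PySem.Dict String PvD3) (r : PvRec) => output.insert ds
        (pvLeafA (output.getD ds (PySem.Dict.mk [])) r.1 r.2.1 r.2.2.1 r.2.2.2.1 r.2.2.2.2))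
      = (fun output r => output.insert ds
        ((output.getD ds (PySem.Dict.mk [])).insert r.2.2.2.1
          (pvF1 ((output.getD ds (PySem.Dict.mk [])).getD r.2.2.2.1 (PySem.Dict.mk [])) r))) := by
    funext output r
    rw [pv_leaf_eq]
  rw [hstep, pv_rmw (pvRecs dsv)
    (fun l1 r => l1.insert r.2.2.2.1 (pvF1 (l1.getD r.2.2.2.1 (PySem.Dict.mk [])) r)) ds o
    (PySem.Dict.mk []), pvG]

-- generic: getD through a keyed insert fold is a fold over the records of that key
theorem pv_getD_keyfold {α ν : Type} (L : List α) (key : α → String) (f : ν → α → ν) (e : ν)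
    (d : PySem.Dict String ν) (q : String) :
    (L.foldl (fun d x => d.insert (key x) (f (d.getD (key x) e) x)) d).getD q e
      = (L.filter (fun x => key x == q)).foldl f (d.getD q e) := by
  induction L generalizing d with
  | nil => rfl
  | cons x L ih =>
    simp only [List.foldl_cons, List.filter_cons]
    by_cases h : key x = q
    · simp only [h, beq_self_eq_true, if_pos, ih, PySem.Dict.getD_insert_self, List.foldl_cons]
    · have hb : (key x == q) = false := by simp [h]
      rw [hb, if_neg (by simp), ih, PySem.Dict.getD_insert_of_ne _ _ _ (fun hh => h hh.symm)]

-- generic: the items of a keyed insert fold from the empty dict group the records by key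
theorem pv_items_keyfold {α ν : Type} (L : List α) (key : α → String) (f : ν → α → ν) (e : ν) :
    (L.foldl (fun d x => d.insert (key x) (f (d.getD (key x) e) x)) (PySem.Dict.mk [])).items
      = (PySem.Set.ofList (L.map key)).map
          (fun q => (q, (L.filter (fun x => key x == q)).foldl f e)) := by
  have hk : (L.foldl (fun d x => d.insert (key x) (f (d.getD (key x) e) x))
      (PySem.Dict.mk ([] : List (String × ν)))).keys = PySem.Set.ofList (L.map key) := by
    rw [PySem.Dict.keys_foldl_insert_key L key
      (fun d x => f (d.getD (key x) e) x) (PySem.Dict.mk [])]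
    simp [PySem.Dict.keys, PySem.Set.update_nil_left]
  have hnd : (L.foldl (fun d x => d.insert (key x) (f (d.getD (key x) e) x))
      (PySem.Dict.mk ([] : List (String × ν)))).keys.Nodup :=
    PySem.Dict.nodup_keys_foldl_insert_key L key
      (fun d x => f (d.getD (key x) e) x) (PySem.Dict.mk []) (by simp [PySem.Dict.keys])
  rw [PySem.Dict.items_eq_map_keys _ hnd e, hk]
  refine List.map_congr_left (fun q _ => ?_)
  rw [pv_getD_keyfold]
  simp [PySem.Dict.getD, PySem.Dict.get?]

-- grouped record views (what the nested items of pvG turn out to be)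
def pvW0 (L : List PvRec) : List (String × Int) :=
  (PySem.Set.ofList (L.map (fun r => r.2.2.1))).map
    (fun b => (b, (L.filter (fun r => r.2.2.1 == b)).foldl (fun _ r => r.2.2.2.2) 0))
def pvW1 (L : List PvRec) : List (String × List (String × Int)) :=
  (PySem.Set.ofList (L.map (fun r => r.2.1))).map
    (fun s => (s, pvW0 (L.filter (fun r => r.2.1 == s))))
def pvW2 (L : List PvRec) : List (String × List (String × List (String × Int))) :=
  (PySem.Set.ofList (L.map (fun r => r.1))).map
    (fun c => (c, pvW1 (L.filter (fun r => r.1 == c))))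
def pvW3 (L : List PvRec) : List (String × List (String × List (String × List (String × Int)))) :=
  (PySem.Set.ofList (L.map (fun r => r.2.2.2.1))).map
    (fun q => (q, pvW2 (L.filter (fun r => r.2.2.2.1 == q))))

-- the four levels of A's dict, characterised one after the other
theorem pv_items0 (L : List PvRec) :
    (L.foldl pvF3 (PySem.Dict.mk [])).items = pvW0 L := by
  have h : pvF3 = fun (d : PvD0) (r : PvRec) => d.insert r.2.2.1
      ((fun (_ : Int) (r : PvRec) => r.2.2.2.2) (d.getD r.2.2.1 0) r) := rfl
  rw [h, pv_items_keyfold L (fun r => r.2.2.1) (fun _ r => r.2.2.2.2) 0, pvW0]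

theorem pv_items1 (L : List PvRec) :
    (L.foldl pvF2 (PySem.Dict.mk [])).items.map (fun r => (r.1, r.2.items)) = pvW1 L := by
  have h : pvF2 = fun (d : PvD1) (r : PvRec) => d.insert r.2.1
      (pvF3 (d.getD r.2.1 (PySem.Dict.mk [])) r) := rfl
  rw [h, pv_items_keyfold L (fun r => r.2.1) pvF3 (PySem.Dict.mk []), pvW1, List.map_map]
  exact List.map_congr_left (fun s _ => by simp [Function.comp, pv_items0])

theorem pv_items2 (L : List PvRec) :
    pvM2 (L.foldl pvF1 (PySem.Dict.mk [])) = pvW2 L := by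
  have h : pvF1 = fun (d : PvD2) (r : PvRec) => d.insert r.1
      (pvF2 (d.getD r.1 (PySem.Dict.mk [])) r) := rfl
  rw [pvM2, h, pv_items_keyfold L (fun r => r.1) pvF2 (PySem.Dict.mk []), pvW2, List.map_map]
  exact List.map_congr_left (fun c _ => by simp [Function.comp, pv_items1])

theorem pv_items3 (dsv : List (String × List (String × List (String × List (String × Int))))) :
    pvM3 (pvG dsv) = pvW3 (pvRecs dsv) := by
  rw [pvM3, pvG, pv_items_keyfold (pvRecs dsv) (fun r => r.2.2.2.1) pvF1 (PySem.Dict.mk []),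
    pvW3, List.map_map]
  exact List.map_congr_left (fun q _ => by simp [Function.comp, pv_items2])

-- B's 'seen' loop is the ordered set of the records' aQueries
theorem pv_seen_eq (dsv : List (String × List (String × List (String × List (String × Int))))) :
    pvSeen dsv = PySem.Set.ofList ((pvRecs dsv).map (fun r => r.2.2.2.1)) := by
  rw [PySem.Set.ofList_eq_foldl, List.foldl_map]
  simp only [pvSeen, pvRecs, List.foldl_flatMap, List.foldl_map]
  rfl

-- Source B's per-aQuery filtered record lists, block by block
def pvRb (q c s : String) (bp : String × List (String × Int)) : List PvRec :=
  (bp.2.filter (fun ap => ap.1 == q)).map (fun ap => (c, s, bp.1, ap.1, ap.2))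
def pvRs (q c : String) (sp : String × List (String × List (String × Int))) : List PvRec :=
  sp.2.flatMap (pvRb q c sp.1)
def pvRc (q : String) (cp : String × List (String × List (String × List (String × Int)))) : List PvRec :=
  cp.2.flatMap (pvRs q cp.1)

theorem pv_filter_recs (q : String)
    (dsv : List (String × List (String × List (String × List (String × Int))))) :
    (pvRecs dsv).filter (fun r => r.2.2.2.1 == q) = dsv.flatMap (pvRc q) := by
  simp only [pvRecs, List.filter_flatMap, List.filter_map, Function.comp_def]
  rfl

-- updating a set with copies of one element adds it once
theorem pv_update_const (L : List String) (acc : PySem.Set String) (k : String)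
    (h : ∀ x ∈ L, x = k) :
    PySem.Set.update acc L = if L.isEmpty then acc else PySem.Set.add acc k := by
  induction L generalizing acc with
  | nil => rfl
  | cons x L ih =>
    have hx : x = k := h x List.mem_cons_self
    rw [PySem.Set.update_cons, ih _ (fun y hy => h y (List.mem_cons_of_mem _ hy)), hx]
    cases L.isEmpty <;> simp

-- the distinct record keys of constant-key blocks are the nonempty blocks' keys, in order
theorem pv_group_keys {β : Type} (blocks : List β) (key : β → String) (recs : β → List PvRec)
    (rkey : PvRec → String) (acc : PySem.Set String)
    (hconst : ∀ bl ∈ blocks, ∀ r ∈ recs bl, rkey r = key bl)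
    (hnd : (blocks.map key).Nodup) (hacc : ∀ bl ∈ blocks, key bl ∉ acc) :
    PySem.Set.update acc (blocks.flatMap (fun bl => (recs bl).map rkey))
      = acc ++ (blocks.filter (fun bl => !(recs bl).isEmpty)).map key := by
  induction blocks generalizing acc with
  | nil => simp [PySem.Set.update]
  | cons bl rest ih =>
    rw [List.map_cons] at hnd
    have hnd' := List.nodup_cons.mp hnd
    have hconst0 : ∀ x ∈ (recs bl).map rkey, x = key bl := by
      intro x hx
      obtain ⟨r, hr, hrx⟩ := List.mem_map.mp hx
      rw [← hrx]; exact hconst bl List.mem_cons_self r hr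
    have hconst' : ∀ b ∈ rest, ∀ r ∈ recs b, rkey r = key b :=
      fun b hb r hr => hconst b (List.mem_cons_of_mem _ hb) r hr
    rw [List.flatMap_cons, PySem.Set.update_append,
      pv_update_const ((recs bl).map rkey) acc (key bl) hconst0]
    cases hE : (recs bl).isEmpty
    · have hne : recs bl ≠ [] := by intro h; rw [h] at hE; simp at hE
      rw [if_neg (by simp [List.isEmpty_iff, hne]),
        PySem.Set.add_of_not_mem (hacc bl List.mem_cons_self),
        ih _ hconst' hnd'.2 (by
          intro b hb
          simp only [List.mem_append, List.mem_singleton]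
          rintro (h | h)
          · exact hacc b (List.mem_cons_of_mem _ hb) h
          · exact hnd'.1 (h ▸ List.mem_map_of_mem hb)),
        List.filter_cons, if_pos (by simp [hE]), List.map_cons]
      simp
    · rw [if_pos (by simp [List.isEmpty_iff.mp hE]),
        ih _ hconst' hnd'.2 (fun b hb => hacc b (List.mem_cons_of_mem _ hb)),
        List.filter_cons, if_neg (by simp [hE])]

-- filtering the concatenated blocks at one block's key returns exactly that block
theorem pv_group_filter {β : Type} (blocks : List β) (key : β → String) (recs : β → List PvRec)
    (rkey : PvRec → String)
    (hconst : ∀ bl ∈ blocks, ∀ r ∈ recs bl, rkey r = key bl)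
    (hnd : (blocks.map key).Nodup) :
    ∀ bl ∈ blocks, (blocks.flatMap recs).filter (fun r => rkey r == key bl) = recs bl := by
  induction blocks with
  | nil => intro bl h; exact absurd h (List.not_mem_nil)
  | cons bl0 rest ih =>
    intro bl hbl
    rw [List.map_cons] at hnd
    have hnd' := List.nodup_cons.mp hnd
    rw [List.flatMap_cons, List.filter_append]
    rcases List.mem_cons.mp hbl with h | h
    · subst h
      rw [List.filter_eq_self.mpr (fun r hr => by
          simp [hconst bl List.mem_cons_self r hr]),
        List.filter_eq_nil_iff.mpr (fun r hr => by
          obtain ⟨b, hb, hrb⟩ := List.mem_flatMap.mp hr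
          rw [hconst b (List.mem_cons_of_mem _ hb) r hrb]
          simp only [beq_iff_eq]
          intro hkey
          exact hnd'.1 (hkey ▸ List.mem_map_of_mem hb)), List.append_nil]
    · rw [List.filter_eq_nil_iff.mpr (fun r hr => by
          rw [hconst bl0 List.mem_cons_self r hr]
          simp only [beq_iff_eq]
          intro hkey
          exact hnd'.1 (hkey ▸ List.mem_map_of_mem h)),
        ih (fun b hb r hr => hconst b (List.mem_cons_of_mem _ hb) r hr) hnd'.2 bl h,
        List.nil_append]

-- one level of grouping over constant-key blocks, under an arbitrary continuation G
theorem pv_group {β γ : Type} (blocks : List β) (key : β → String) (recs : β → List PvRec)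
    (rkey : PvRec → String) (G : List PvRec → γ)
    (hconst : ∀ bl ∈ blocks, ∀ r ∈ recs bl, rkey r = key bl)
    (hnd : (blocks.map key).Nodup) :
    (PySem.Set.ofList ((blocks.flatMap recs).map rkey)).map
        (fun k => (k, G ((blocks.flatMap recs).filter (fun r => rkey r == k))))
      = (blocks.filter (fun bl => !(recs bl).isEmpty)).map (fun bl => (key bl, G (recs bl))) := by
  have hkeys : PySem.Set.ofList ((blocks.flatMap recs).map rkey)
      = (blocks.filter (fun bl => !(recs bl).isEmpty)).map key := by
    rw [List.map_flatMap, ← PySem.Set.update_nil_left]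
    simpa using pv_group_keys blocks key recs rkey [] hconst hnd (by simp)
  rw [hkeys, List.map_map]
  refine List.map_congr_left (fun bl hbl => ?_)
  have hmem : bl ∈ blocks := (List.mem_filter.mp hbl).1
  simp only [Function.comp]
  rw [pv_group_filter blocks key recs rkey hconst hnd bl hmem]

-- the nonemptiness of a filtered block is Source B's membership test, level by level
theorem pv_ne_b (q c s : String) (bp : String × List (String × Int)) :
    (!(pvRb q c s bp).isEmpty) = pvHasQ4 q bp.2 := by
  rw [Bool.eq_iff_iff]
  simp [pvRb, pvHasQ4, List.filter_eq_nil_iff, List.any_eq_true]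

theorem pv_ne_s (q c : String) (sp : String × List (String × List (String × Int))) :
    (!(pvRs q c sp).isEmpty) = pvHasQ3 q sp.2 := by
  rw [Bool.eq_iff_iff]
  simp only [pvRs, pvHasQ3, Bool.not_eq_true', List.isEmpty_iff, ← Bool.not_eq_true,
    List.flatMap_eq_nil_iff, List.any_eq_true]
  constructor
  · intro h
    by_contra hall
    simp only [not_exists, not_and] at hall
    exact h (fun bp hbp => by
      have := hall bp hbp
      rw [← pv_ne_b q c sp.1 bp] at this
      simpa [List.isEmpty_iff] using this)
  · rintro ⟨bp, hbp, hq⟩ hall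
    have := hall bp hbp
    have h2 : (!(pvRb q c sp.1 bp).isEmpty) = false := by simp [this]
    rw [pv_ne_b] at h2
    rw [h2] at hq
    exact absurd hq (by simp)

theorem pv_ne_c (q : String) (cp : String × List (String × List (String × List (String × Int)))) :
    (!(pvRc q cp).isEmpty) = pvHasQ2 q cp.2 := by
  rw [Bool.eq_iff_iff]
  simp only [pvRc, pvHasQ2, Bool.not_eq_true', List.isEmpty_iff, ← Bool.not_eq_true,
    List.flatMap_eq_nil_iff, List.any_eq_true]
  constructor
  · intro h
    by_contra hall
    simp only [not_exists, not_and] at hall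
    exact h (fun sp hsp => by
      have := hall sp hsp
      rw [← pv_ne_s q cp.1 sp] at this
      simpa [List.isEmpty_iff] using this)
  · rintro ⟨sp, hsp, hq⟩ hall
    have := hall sp hsp
    have h2 : (!(pvRs q cp.1 sp).isEmpty) = false := by simp [this]
    rw [pv_ne_s] at h2
    rw [h2] at hq
    exact absurd hq (by simp)

-- the last (unique) value of the filtered leaves is the dict lookup of Source B
theorem pv_lastv (l : List (String × Int)) (q : String) (hnd : (l.map Prod.fst).Nodup) :
    (l.filter (fun ap => ap.1 == q)).foldl (fun _ ap => ap.2) 0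
      = (PySem.Dict.mk l).getD q 0 := by
  induction l with
  | nil => rfl
  | cons a l ih =>
    rw [List.map_cons] at hnd
    have hnd' := List.nodup_cons.mp hnd
    rw [List.filter_cons, PySem.Dict.getD_eq_get?_getD, PySem.Dict.get?_mk_cons]
    by_cases h : a.1 = q
    · rw [if_pos (by simp [h]), if_pos (by simp [h])]
      have hrest : l.filter (fun ap => ap.1 == q) = [] :=
        List.filter_eq_nil_iff.mpr (fun b hb => by
          simp only [beq_iff_eq]
          intro hq
          exact hnd'.1 (h ▸ hq ▸ List.mem_map_of_mem hb))
      simp [hrest]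
    · rw [if_neg (by simp [h]), if_neg (by simp [h]),
        ih hnd'.2, PySem.Dict.getD_eq_get?_getD]

-- the grouped view of the records filtered at q is Source B's projection
theorem pv_proj_eq (q : String)
    (dsv : List (String × List (String × List (String × List (String × Int)))))
    (h1 : (dsv.map Prod.fst).Nodup)
    (h2 : ∀ cp ∈ dsv, (cp.2.map Prod.fst).Nodup ∧
      ∀ sp ∈ cp.2, (sp.2.map Prod.fst).Nodup ∧ ∀ bp ∈ sp.2, (bp.2.map Prod.fst).Nodup) :
    pvW2 ((pvRecs dsv).filter (fun r => r.2.2.2.1 == q)) = pvProj q dsv := by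
  rw [pv_filter_recs, pvW2, pvProj,
    pv_group dsv Prod.fst (pvRc q) (fun r => r.1) _
      (by
        rintro cp hcp r hr
        simp only [pvRc, pvRs, pvRb, List.mem_flatMap, List.mem_map] at hr
        obtain ⟨sp, _, bp, _, ap, _, hr⟩ := hr
        rw [← hr]) h1,
    List.filter_congr (fun cp _ => pv_ne_c q cp)]
  refine List.map_congr_left (fun cp hcp => ?_)
  have hcp' : cp ∈ dsv := (List.mem_filter.mp hcp).1
  obtain ⟨hndc, hin⟩ := h2 cp hcp'
  refine congrArg _ ?_
  rw [pvRc, pvW1,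
    pv_group cp.2 Prod.fst (pvRs q cp.1) (fun r => r.2.1) _
      (by
        rintro sp hsp r hr
        simp only [pvRs, pvRb, List.mem_flatMap, List.mem_map] at hr
        obtain ⟨bp, _, ap, _, hr⟩ := hr
        rw [← hr]) hndc,
    List.filter_congr (fun sp _ => pv_ne_s q cp.1 sp)]
  refine List.map_congr_left (fun sp hsp => ?_)
  have hsp' : sp ∈ cp.2 := (List.mem_filter.mp hsp).1
  obtain ⟨hnds, hinb⟩ := hin sp hsp'
  refine congrArg _ ?_
  rw [pvRs, pvW0,
    pv_group sp.2 Prod.fst (pvRb q cp.1 sp.1) (fun r => r.2.2.1) _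
      (by
        rintro bp hbp r hr
        simp only [pvRb, List.mem_map] at hr
        obtain ⟨ap, _, hr⟩ := hr
        rw [← hr]) hnds,
    List.filter_congr (fun bp _ => pv_ne_b q cp.1 sp.1 bp)]
  refine List.map_congr_left (fun bp hbp => ?_)
  have hbp' : bp ∈ sp.2 := (List.mem_filter.mp hbp).1
  refine congrArg _ ?_
  rw [pvRb, List.foldl_map]
  exact pv_lastv bp.2 q (hinb bp hbp')

-- one dataset: A's reordered dict, marshalled, is B's query-major projection
theorem pv_dataset (dsv : List (String × List (String × List (String × List (String × Int)))))
    (h1 : (dsv.map Prod.fst).Nodup)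
    (h2 : ∀ cp ∈ dsv, (cp.2.map Prod.fst).Nodup ∧
      ∀ sp ∈ cp.2, (sp.2.map Prod.fst).Nodup ∧ ∀ bp ∈ sp.2, (bp.2.map Prod.fst).Nodup) :
    pvM3 (pvG dsv) = (pvSeen dsv).map (fun q => (q, pvProj q dsv)) := by
  rw [pv_items3, pvW3, pv_seen_eq]
  exact List.map_congr_left (fun q _ => by rw [pv_proj_eq q dsv h1 h2])

-- ===== VERDICT (by name: the statement is the Claim_ definition above) =====
theorem indexPerAQuery_spec : Claim_equal_indexPerAQuery := by
  intro data _hdom hpre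
  obtain ⟨hnd, hrest⟩ := hpre
  unfold Spec_indexPerAQuery indexPerAQuery indexPerAQuery_alt
  have hA : (data.foldl (fun output dsp =>
      let output := output.insert dsp.1 (PySem.Dict.mk [])
      dsp.2.foldl (fun output cp =>
        cp.2.foldl (fun output sp =>
          sp.2.foldl (fun output bp =>
            bp.2.foldl (fun output ap =>
              output.insert dsp.1
                (pvLeafA (output.getD dsp.1 (PySem.Dict.mk [])) cp.1 sp.1 bp.1 ap.1 ap.2))
              output) output) output) output) (PySem.Dict.mk []))
      = data.foldl (fun o dsp => o.insert dsp.1 (pvG dsp.2)) (PySem.Dict.mk []) := by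
    congr 1
    funext o dsp
    exact pv_A_block o dsp.1 dsp.2
  rw [hA, pvOut,
    PySem.Dict.items_foldl_insert_fresh data Prod.fst (fun dsp => pvG dsp.2) (PySem.Dict.mk [])
      (fun a _ => by simp [PySem.Dict.contains]) hnd,
    PySem.Dict.items_foldl_insert_fresh data Prod.fst
      (fun dsp => (pvSeen dsp.2).map (fun q => (q, pvProj q dsp.2))) (PySem.Dict.mk [])
      (fun a _ => by simp [PySem.Dict.contains]) hnd]
  simp only [List.nil_append, List.map_map]
  refine List.map_congr_left (fun dsp hdsp => ?_)
  obtain ⟨hd1, hd2⟩ := hrest dsp hdsp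
  simp only [Function.comp]
  rw [pv_dataset dsp.2 hd1 hd2]
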